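-- pv_equiv track=rewrite | github.com/yutsang/review-sentiment | full_analysis.py | preserve_phrases_for_wordcloud
-- ===== SOURCE A (Python) =====
-- def preserve_phrases_for_wordcloud(text: str) -> str:
--     """Preserve multi-word phrases for wordcloud by using underscores to keep them together"""
--     words = text.split()
--     processed_words = []
--
--     i = 0
--     while i < len(words):
--         # Check if this word is part of a phrase (2-4 words max for readability)
--         phrase_length = 1
--         phrase_words = [words[i]]
--
--         # Look ahead to find complete phrases (max 4 words for readability)
--         for j in range(1, 4):  # Check up to 4 words
--             if i + j < len(words):
--                 next_word = words[i + j]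
--                 # If next word doesn't start with uppercase or is a common connector, it's part of phrase
--                 if (not next_word[0].isupper() and
--                     next_word.lower() not in ['the', 'a', 'an', 'and', 'or', 'but', 'in', 'on', 'at', 'to', 'for', 'of', 'with', 'by', 'is', 'are', 'was', 'were', 'has', 'have', 'had']):
--                     phrase_words.append(next_word)
--                     phrase_length += 1
--                 else:
--                     break
--             else:
--                 break
--
--         # If we have a meaningful phrase (2-4 words), join with underscores for wordcloud
--         if phrase_length >= 2 and phrase_length <= 4:
--             phrase = '_'.join(phrase_words)
--             # Only add if it's a meaningful phrase (not too long)
--             if len(phrase) <= 30:  # Limit phrase length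
--                 processed_words.append(phrase)
--             else:
--                 # If too long, just add the first word
--                 processed_words.append(words[i])
--             i += phrase_length  # Skip the words we've already processed
--         else:
--             # Single word, keep as is
--             processed_words.append(words[i])
--             i += 1
--
--     return ' '.join(processed_words)
-- ===== SOURCE B (Python) =====
-- _CONNECTORS = {'the', 'a', 'an', 'and', 'or', 'but', 'in', 'on', 'at', 'to', 'for', 'of',
--                'with', 'by', 'is', 'are', 'was', 'were', 'has', 'have', 'had'}
--
--
-- def _flush(group):
--     """Emit the tokens for one finished group."""
--     if len(group) == 1:
--         return [group[0]]
--     phrase = '_'.join(group)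
--     return [phrase] if len(phrase) <= 30 else [group[0]]
--
--
-- def preserve_phrases_for_wordcloud(text: str) -> str:
--     """Single streaming pass: grow a group of up to 4 words, flush on each break."""
--     words = text.split()
--     if not words:
--         return ''
--     tokens = []
--     group = [words[0]]
--     for w in words[1:]:
--         if len(group) < 4 and not w[0].isupper() and w.lower() not in _CONNECTORS:
--             group.append(w)
--         else:
--             tokens.extend(_flush(group))
--             group = [w]
--     tokens.extend(_flush(group))
--     return ' '.join(tokens)
-- ===== Notes on version B (the rewrite author's own statement) =====
-- stated objective: simpler
-- what changed: Replaced the index-based while loop that rescans up to 3 words ahead at each phrase start with a single streaming pass that carries the current group in an accumulator and flushes it at each break word.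
import Mathlib
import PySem

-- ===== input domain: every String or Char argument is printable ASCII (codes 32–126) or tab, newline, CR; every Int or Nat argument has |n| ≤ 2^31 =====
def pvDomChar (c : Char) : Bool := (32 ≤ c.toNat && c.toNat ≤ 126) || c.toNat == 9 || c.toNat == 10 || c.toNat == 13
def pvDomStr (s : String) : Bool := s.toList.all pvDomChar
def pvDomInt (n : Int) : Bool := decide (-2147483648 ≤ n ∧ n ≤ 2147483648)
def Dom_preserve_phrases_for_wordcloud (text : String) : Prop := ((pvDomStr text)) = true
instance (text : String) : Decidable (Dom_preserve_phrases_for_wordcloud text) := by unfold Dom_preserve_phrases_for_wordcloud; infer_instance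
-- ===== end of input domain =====

-- B replaces A's index-based while loop with a lookahead rescan by a single streaming
-- pass that maintains the current group and flushes it at each break word (objective: simpler).

-- ===== PORT A =====
-- the connector list from A's inner condition (same literal in B's source)
def pvConnectors : List String :=
  ["the", "a", "an", "and", "or", "but", "in", "on", "at", "to", "for", "of",
   "with", "by", "is", "are", "was", "were", "has", "have", "had"]

-- `not next_word[0].isupper() and next_word.lower() not in [...]` (words from split() are
-- nonempty, so the `none` branch of `pyGet?` is unreachable)
def pvCont (w : String) : Bool :=
  (!(match PySem.Str.pyGet? w 0 with
     | some c => PySem.Chars.isupper c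
     | none => false)) && !(pvConnectors.contains (PySem.Str.lower w))

-- A's inner `for j in range(1, 4)` lookahead: how many of the next (at most 3) words
-- extend the phrase (stops at the first non-continuation word or at the end)
def pvExt : List String → Nat → Nat
  | _, 0 => 0
  | [], _ + 1 => 0
  | w :: ws, k + 1 => if pvCont w then 1 + pvExt ws k else 0

-- A's outer `while i < len(words)` loop, as recursion over the remaining words
def pvLoopA : List String → List String
  | [] => []
  | w :: ws =>
    let n := pvExt ws 3          -- phrase_length = 1 + n, phrase_words = w :: ws.take n
    if 2 ≤ 1 + n && 1 + n ≤ 4 then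
      let phrase := PySem.Str.join "_" (w :: ws.take n)
      (if PySem.Str.len phrase ≤ 30 then phrase else w) :: pvLoopA (ws.drop n)
    else
      w :: pvLoopA ws
termination_by ws => ws.length
decreasing_by
  · simp only [List.length_drop, List.length_cons]; omega
  · simp

def preserve_phrases_for_wordcloud (text : String) : String :=
  PySem.Str.join " " (pvLoopA (PySem.Str.split₀ text))

-- ===== PORT B =====
-- B's _flush helper
def pvFlush : List String → List String
  | [] => []
  | [w] => [w]
  | w :: rest =>
    let p := PySem.Str.join "_" (w :: rest)
    if PySem.Str.len p ≤ 30 then [p] else [w]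

-- B's single `for w in words[1:]` pass, carrying the current group
def pvLoopB (g : List String) : List String → List String
  | [] => pvFlush g
  | w :: ws =>
    if g.length < 4 && pvCont w then pvLoopB (g ++ [w]) ws
    else pvFlush g ++ pvLoopB [w] ws

def preserve_phrases_for_wordcloud_alt (text : String) : String :=
  match PySem.Str.split₀ text with
  | [] => ""
  | w :: ws => PySem.Str.join " " (pvLoopB [w] ws)

-- ===== PRECONDITION & SPEC =====
def Spec_preserve_phrases_for_wordcloud (text : String) (out : String) : Prop := out = preserve_phrases_for_wordcloud_alt text
instance (text : String) (out : String) : Decidable (Spec_preserve_phrases_for_wordcloud text out) := by unfold Spec_preserve_phrases_for_wordcloud; infer_instance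

-- ===== CLAIM (what is proved, stated in full; the proofs are below) =====
def Claim_equal_preserve_phrases_for_wordcloud : Prop := ∀ (text : String), Dom_preserve_phrases_for_wordcloud text → Spec_preserve_phrases_for_wordcloud text (preserve_phrases_for_wordcloud text)

-- ===== LEMMAS AND PROOFS =====

theorem pvExt_le (ws : List String) (k : Nat) : pvExt ws k ≤ k := by
  induction ws generalizing k with
  | nil => cases k <;> simp [pvExt]
  | cons w ws ih =>
    cases k with
    | zero => simp [pvExt]
    | succ k =>
      simp only [pvExt]
      split
      · have := ih k; omega
      · omega

theorem pvExt_nil (k : Nat) : pvExt [] k = 0 := by cases k <;> rfl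

-- One step of A's loop, written with B's flush of the looked-ahead group
theorem pvLoopA_cons (w : String) (ws : List String) :
    pvLoopA (w :: ws) =
      pvFlush (w :: ws.take (pvExt ws 3)) ++ pvLoopA (ws.drop (pvExt ws 3)) := by
  rcases hn : pvExt ws 3 with _ | m
  · simp [pvLoopA, hn, pvFlush]
  · have h3 := pvExt_le ws 3
    rw [hn] at h3
    cases ws with
    | nil => simp [pvExt_nil] at hn
    | cons x xs =>
      simp only [pvLoopA, hn]
      have hcond : (2 ≤ 1 + (m + 1) && 1 + (m + 1) ≤ 4) = true := by
        simp; omega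
      rw [if_pos hcond]
      simp only [pvFlush, List.take_succ_cons]
      split <;> simp

-- B's pass with current group g equals: finish the group A would build from g, then A's loop
theorem pvLoopB_eq (ws : List String) (g : List String) (hg : g ≠ []) :
    pvLoopB g ws =
      pvFlush (g ++ ws.take (pvExt ws (4 - g.length))) ++
        pvLoopA (ws.drop (pvExt ws (4 - g.length))) := by
  induction ws generalizing g with
  | nil => simp [pvLoopB, pvExt_nil, pvLoopA]
  | cons w ws ih =>
    simp only [pvLoopB]
    by_cases hc : (g.length < 4 && pvCont w) = true
    · rw [if_pos hc]
      simp only [Bool.and_eq_true, decide_eq_true_eq] at hc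
      rw [ih (g ++ [w]) (by simp)]
      have h4 : 4 - g.length = (4 - (g ++ [w]).length) + 1 := by
        simp only [List.length_append, List.length_cons, List.length_nil]; omega
      rw [h4]
      simp only [pvExt, hc.2, if_true]
      set n := pvExt ws (4 - (g ++ [w]).length) with hn
      rw [Nat.add_comm 1 n]
      simp only [List.take_succ_cons, List.drop_succ_cons, List.append_assoc,
        List.singleton_append]
    · rw [if_neg hc]
      rw [ih [w] (by simp)]
      have h0 : pvExt (w :: ws) (4 - g.length) = 0 := by
        rcases hk : 4 - g.length with _ | k
        · rfl
        · have hcw : pvCont w = false := by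
            by_contra h
            rw [Bool.not_eq_false] at h
            apply hc
            simp only [Bool.and_eq_true, decide_eq_true_eq, h, and_true]
            omega
          simp [pvExt, hcw]
      rw [h0]
      simp only [List.take_zero, List.drop_zero, List.append_nil,
        List.length_cons, List.length_nil]
      rw [pvLoopA_cons]
      simp

-- ===== VERDICT (by name: the statement is the Claim_ definition above) =====
theorem preserve_phrases_for_wordcloud_spec : Claim_equal_preserve_phrases_for_wordcloud := by
  intro text _
  unfold Spec_preserve_phrases_for_wordcloud preserve_phrases_for_wordcloud preserve_phrases_for_wordcloud_alt
  rcases h : PySem.Str.split₀ text with _ | ⟨w, ws⟩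
  · show PySem.Str.join " " (pvLoopA []) = ""
    simp [pvLoopA, PySem.Str.join, PySem.Chars.join]
    rfl
  · show PySem.Str.join " " (pvLoopA (w :: ws)) = PySem.Str.join " " (pvLoopB [w] ws)
    rw [pvLoopB_eq ws [w] (by simp)]
    simp only [List.length_cons, List.length_nil]
    rw [List.singleton_append, ← pvLoopA_cons]
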